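-- pv_equiv track=rewrite | github.com/SirbayC/agg-mia | src/mias/trawic/infill.py | _extract_infill_from_output
-- ===== SOURCE A (Python) =====
-- from typing import Dict, List, Optional
--
-- FIM_MIDDLE = "<fim_middle>"
--
-- END_OF_TEXT = "<|endoftext|>"
--
-- FILE_SEP = "<file_sep>"
--
-- def _extract_infill_from_output(full_output: str, stop_strings: List[str]) -> Optional[str]:
--     if FIM_MIDDLE not in full_output:
--         return None
--     start_idx = full_output.find(FIM_MIDDLE) + len(FIM_MIDDLE)
--     end_idx = len(full_output)
--     for stop_str in stop_strings + [END_OF_TEXT, FILE_SEP]: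
--         idx = full_output.find(stop_str, start_idx)
--         if idx != -1 and idx < end_idx:
--             end_idx = idx
--     return full_output[start_idx:end_idx].strip()
-- ===== SOURCE B (Python) =====
-- from typing import List, Optional
--
-- FIM_MIDDLE = "<fim_middle>"
-- END_OF_TEXT = "<|endoftext|>"
-- FILE_SEP = "<file_sep>"
--
-- def _extract_infill_from_output(full_output: str, stop_strings: List[str]) -> Optional[str]:
--     start_idx = full_output.find(FIM_MIDDLE)
--     if start_idx == -1:
--         return None
--     start_idx += len(FIM_MIDDLE)
--     stops = stop_strings + [END_OF_TEXT, FILE_SEP]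
--     end_idx = len(full_output)
--     for i in range(start_idx, len(full_output) + 1):
--         if any(full_output.startswith(s, i) for s in stops):
--             end_idx = i
--             break
--     return full_output[start_idx:end_idx].strip()
-- ===== Notes on version B (the rewrite author's own statement) =====
-- stated objective: alternative
-- what changed: A takes, for each stop string separately, full_output.find(stop, start_idx) and folds the minimum; B scans the tail left to right once and stops at the first position where any stop string starts (first-match position scan instead of per-stop find/min).
import Mathlib
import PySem

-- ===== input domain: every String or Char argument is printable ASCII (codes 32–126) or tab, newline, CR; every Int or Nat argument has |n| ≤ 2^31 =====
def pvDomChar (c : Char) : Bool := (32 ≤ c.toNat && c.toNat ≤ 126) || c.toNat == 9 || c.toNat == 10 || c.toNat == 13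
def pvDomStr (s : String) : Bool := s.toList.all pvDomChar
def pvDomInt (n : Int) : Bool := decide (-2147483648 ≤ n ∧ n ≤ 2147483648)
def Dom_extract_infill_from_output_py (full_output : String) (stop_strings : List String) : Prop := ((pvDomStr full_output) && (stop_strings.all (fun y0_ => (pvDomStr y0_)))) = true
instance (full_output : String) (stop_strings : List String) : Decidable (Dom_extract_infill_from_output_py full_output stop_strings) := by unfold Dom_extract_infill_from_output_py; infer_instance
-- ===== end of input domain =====

-- B replaces A's per-stop-string find/min loop by a single left-to-right scan of the tail that
-- stops at the first position where any stop string starts (objective: alternative, same cost class).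

def pvFIM : String := "<fim_middle>"
def pvEOT : String := "<|endoftext|>"
def pvFSEP : String := "<file_sep>"

-- ===== PORT A =====
def extract_infill_from_output_py (full_output : String) (stop_strings : List String) : Option String :=
  if PySem.Str.isIn pvFIM full_output = false then none
  else
    let start_idx : Int := PySem.Str.find full_output pvFIM + PySem.Str.len pvFIM
    let end_idx : Int := (stop_strings ++ [pvEOT, pvFSEP]).foldl
      (fun e stop =>
        let idx := PySem.Str.findFrom full_output stop start_idx none
        if idx ≠ -1 ∧ idx < e then idx else e)
      (PySem.Str.len full_output)
    some (PySem.Str.strip (PySem.Str.slice full_output (some start_idx) (some end_idx)))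

-- ===== PORT B =====
-- index (from the head of `tail`) of the first position at which some stop string starts;
-- none if no stop string occurs anywhere in `tail` (this is Source B's scanning for-loop)
def pvFindStop (stops : List (List Char)) : List Char → Option Nat
  | [] => if stops.any (fun p => p.isPrefixOf []) then some 0 else none
  | c :: t =>
    if stops.any (fun p => p.isPrefixOf (c :: t)) then some 0
    else (pvFindStop stops t).map (· + 1)

def extract_infill_from_output_py_alt (full_output : String) (stop_strings : List String) : Option String :=
  let s := full_output.toList
  let f := PySem.Chars.find s pvFIM.toList
  if f = -1 then none
  else
    let start := f.toNat + pvFIM.toList.length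
    let tail := s.drop start
    let stops := (stop_strings ++ [pvEOT, pvFSEP]).map String.toList
    let k := (pvFindStop stops tail).getD tail.length
    some (String.ofList (PySem.Chars.strip (tail.take k)))

-- ===== PRECONDITION & SPEC =====
def Spec_extract_infill_from_output_py (full_output : String) (stop_strings : List String) (out : Option String) : Prop := out = extract_infill_from_output_py_alt full_output stop_strings
instance (full_output : String) (stop_strings : List String) (out : Option String) : Decidable (Spec_extract_infill_from_output_py full_output stop_strings out) := by unfold Spec_extract_infill_from_output_py; infer_instance

-- ===== CLAIM (what is proved, stated in full; the proofs are below) =====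
def Claim_equal_extract_infill_from_output_py : Prop := ∀ (full_output : String) (stop_strings : List String), Dom_extract_infill_from_output_py full_output stop_strings → Spec_extract_infill_from_output_py full_output stop_strings (extract_infill_from_output_py full_output stop_strings)

-- ===== LEMMAS AND PROOFS =====

-- A's inner fold, rebased onto the tail (proof-only abbreviation)
def pvG (tail : List Char) (e : Int) (p : List Char) : Int :=
  if PySem.Chars.find tail p ≠ -1 ∧ PySem.Chars.find tail p < e then PySem.Chars.find tail p else e

lemma pvG_spec (tail : List Char) (stops : List (List Char)) : ∀ e : Int,
    (stops.foldl (pvG tail) e = e ∨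
      ∃ p ∈ stops, stops.foldl (pvG tail) e = PySem.Chars.find tail p ∧ PySem.Chars.find tail p ≠ -1)
    ∧ stops.foldl (pvG tail) e ≤ e
    ∧ ∀ p ∈ stops, PySem.Chars.find tail p ≠ -1 → stops.foldl (pvG tail) e ≤ PySem.Chars.find tail p := by
  induction stops with
  | nil => intro e; simp
  | cons q rest ih =>
    intro e
    obtain ⟨h1, h2, h3⟩ := ih (pvG tail e q)
    by_cases hq : PySem.Chars.find tail q ≠ -1 ∧ PySem.Chars.find tail q < e
    · obtain ⟨hq1, hq2⟩ := hq
      have hGe : pvG tail e q = PySem.Chars.find tail q := by simp [pvG, hq1, hq2]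
      rw [hGe] at h1 h2 h3
      refine ⟨?_, ?_, ?_⟩
      · rcases h1 with h | ⟨p, hp, hfp⟩
        · exact Or.inr ⟨q, by simp, by rw [List.foldl_cons, hGe, h], hq1⟩
        · exact Or.inr ⟨p, by simp [hp], by rw [List.foldl_cons, hGe]; exact hfp.1, hfp.2⟩
      · rw [List.foldl_cons, hGe]; omega
      · intro p hp hfp
        rcases List.mem_cons.mp hp with rfl | hp'
        · rw [List.foldl_cons, hGe]; exact h2
        · rw [List.foldl_cons, hGe]; exact h3 p hp' hfp
    · have hGe : pvG tail e q = e := by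
        simp only [pvG, ite_eq_right_iff, and_imp]
        intro h1' h2'; exact absurd ⟨h1', h2'⟩ hq
      rw [hGe] at h1 h2 h3
      refine ⟨?_, ?_, ?_⟩
      · rcases h1 with h | ⟨p, hp, hfp⟩
        · exact Or.inl (by rw [List.foldl_cons, hGe, h])
        · exact Or.inr ⟨p, by simp [hp], by rw [List.foldl_cons, hGe]; exact hfp.1, hfp.2⟩
      · rw [List.foldl_cons, hGe]; exact h2
      · intro p hp hfp
        rcases List.mem_cons.mp hp with rfl | hp'
        · rw [Classical.not_and_iff_not_or_not, or_iff_not_imp_left, Classical.not_not] at hq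
          have := hq hfp
          rw [List.foldl_cons, hGe]; omega
        · rw [List.foldl_cons, hGe]; exact h3 p hp' hfp

lemma pvFindStop_some (stops : List (List Char)) :
    ∀ (tail : List Char) (k : Nat), pvFindStop stops tail = some k →
    k ≤ tail.length ∧ stops.any (fun p => p.isPrefixOf (tail.drop k)) = true ∧
      ∀ j < k, stops.any (fun p => p.isPrefixOf (tail.drop j)) = false := by
  intro tail
  induction tail with
  | nil =>
    intro k h
    unfold pvFindStop at h
    cases hg : stops.any (fun p => p.isPrefixOf ([] : List Char)) with
    | true => rw [if_pos hg] at h; cases h; exact ⟨Nat.le_refl 0, by simpa using hg, by omega⟩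
    | false => rw [if_neg (by simp [hg])] at h; cases h
  | cons c t ih =>
    intro k h
    unfold pvFindStop at h
    cases hg : stops.any (fun p => p.isPrefixOf (c :: t)) with
    | true =>
      rw [if_pos hg] at h; cases h
      exact ⟨Nat.zero_le _, by simpa using hg, by omega⟩
    | false =>
      rw [if_neg (by simp [hg])] at h
      rw [Option.map_eq_some_iff] at h
      obtain ⟨k', hk', rfl⟩ := h
      obtain ⟨hle, hany, hmin⟩ := ih k' hk'
      refine ⟨by simpa using Nat.succ_le_succ hle, by simpa using hany, ?_⟩
      intro j hj
      cases j with
      | zero => simpa using hg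
      | succ j' => simpa using hmin j' (by omega)

lemma pvFindStop_none (stops : List (List Char)) :
    ∀ (tail : List Char), pvFindStop stops tail = none →
    ∀ j, stops.any (fun p => p.isPrefixOf (tail.drop j)) = false := by
  intro tail
  induction tail with
  | nil =>
    intro h j
    unfold pvFindStop at h
    cases hg : stops.any (fun p => p.isPrefixOf ([] : List Char)) with
    | true => rw [if_pos hg] at h; cases h
    | false => simpa using hg
  | cons c t ih =>
    intro h j
    unfold pvFindStop at h
    cases hg : stops.any (fun p => p.isPrefixOf (c :: t)) with
    | true => rw [if_pos hg] at h; cases h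
    | false =>
      rw [if_neg (by simp [hg]), Option.map_eq_none_iff] at h
      cases j with
      | zero => simpa using hg
      | succ j' => simpa using ih h j'

lemma pv_find_le_of_prefix_drop (tail p : List Char) (j : Nat) (h : p <+: tail.drop j) :
    PySem.Chars.find tail p ≠ -1 ∧ PySem.Chars.find tail p ≤ (j : Int) := by
  have hin : PySem.Chars.isIn p tail = true :=
    (PySem.Chars.exists_prefix_drop_iff_isIn (s := tail) (sub := p)).mp ⟨j, h⟩
  have hne : PySem.Chars.find tail p ≠ -1 := by
    rw [PySem.Chars.find_ne_neg_one_iff, ← PySem.Chars.isIn_iff_infix]; exact hin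
  have hge : 0 ≤ PySem.Chars.find tail p := by
    have := PySem.Chars.neg_one_le_find (s := tail) (sub := p); omega
  obtain ⟨_, hmin⟩ := PySem.Chars.find_spec (s := tail) (sub := p) hge
  refine ⟨hne, ?_⟩
  by_contra hlt
  exact hmin j (by omega) h

-- the core fact: A's min-over-finds fold (rebased on the tail) equals B's first-match scan
lemma pv_fold_eq_scan (stops : List (List Char)) (tail : List Char) :
    stops.foldl (pvG tail) ((tail.length : Nat) : Int) =
      (((pvFindStop stops tail).getD tail.length : Nat) : Int) := by
  obtain ⟨h1, h2, h3⟩ := pvG_spec tail stops ((tail.length : Nat) : Int)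
  cases hfs : pvFindStop stops tail with
  | none =>
    simp only [Option.getD_none]
    rcases h1 with h | ⟨p, hp, hfp, hne⟩
    · exact h
    · -- p occurs in tail, contradicting pvFindStop = none
      have hge : 0 ≤ PySem.Chars.find tail p := by
        have := PySem.Chars.neg_one_le_find (s := tail) (sub := p); omega
      obtain ⟨hpref, _⟩ := PySem.Chars.find_spec (s := tail) (sub := p) hge
      have hany := pvFindStop_none stops tail hfs (PySem.Chars.find tail p).toNat
      rw [List.any_eq_false] at hany
      exact absurd (List.isPrefixOf_iff_prefix.mpr hpref) (by simpa using hany p hp)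
  | some k =>
    simp only [Option.getD_some]
    obtain ⟨hkle, hany, hmin⟩ := pvFindStop_some stops tail k hfs
    rw [List.any_eq_true] at hany
    obtain ⟨p0, hp0, hpref0⟩ := hany
    have hpref0' : p0 <+: tail.drop k := List.isPrefixOf_iff_prefix.mp (by simpa using hpref0)
    obtain ⟨hne0, hle0⟩ := pv_find_le_of_prefix_drop tail p0 k hpref0'
    have hub : stops.foldl (pvG tail) ((tail.length : Nat) : Int) ≤ (k : Int) :=
      le_trans (h3 p0 hp0 hne0) hle0
    rcases h1 with h | ⟨p, hp, hfp, hne⟩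
    · omega
    · -- the fold returned find tail p; minimality of k gives k ≤ find tail p
      have hge : 0 ≤ PySem.Chars.find tail p := by
        have := PySem.Chars.neg_one_le_find (s := tail) (sub := p); omega
      obtain ⟨hpref, _⟩ := PySem.Chars.find_spec (s := tail) (sub := p) hge
      have hlb : (k : Int) ≤ PySem.Chars.find tail p := by
        by_contra hlt
        have := hmin (PySem.Chars.find tail p).toNat (by omega)
        rw [List.any_eq_false] at this
        exact absurd (List.isPrefixOf_iff_prefix.mpr hpref) (by simpa using this p hp)
      omega

-- rebasing A's fold over the full string onto the tail
lemma pv_fold_rebase (s : List Char) (start : Nat) (hstart : start ≤ s.length) :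
    ∀ (stops : List (List Char)) (e : Int),
    stops.foldl (fun e p =>
        let idx := PySem.Chars.findFrom s p (start : Int) none
        if idx ≠ -1 ∧ idx < e then idx else e) ((start : Int) + e) =
      (start : Int) + stops.foldl (pvG (s.drop start)) e := by
  intro stops
  induction stops with
  | nil => intro e; simp
  | cons p rest ih =>
    intro e
    rw [List.foldl_cons, List.foldl_cons]
    have hrw : PySem.Chars.findFrom s p (start : Int) none =
        if PySem.Chars.find (s.drop start) p = -1 then -1
        else (start : Int) + PySem.Chars.find (s.drop start) p :=
      PySem.Chars.findFrom_natCast s p start hstart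
    by_cases hf : PySem.Chars.find (s.drop start) p = -1
    · have : ¬ (PySem.Chars.findFrom s p (start : Int) none ≠ -1 ∧
          PySem.Chars.findFrom s p (start : Int) none < (start : Int) + e) := by
        rw [hrw]; simp [hf]
      rw [if_neg this]
      have : pvG (s.drop start) e p = e := by simp [pvG, hf]
      rw [this]
      exact ih e
    · have hge : 0 ≤ PySem.Chars.find (s.drop start) p := by
        have := PySem.Chars.neg_one_le_find (s := s.drop start) (sub := p); omega
      rw [hrw, if_neg hf]
      by_cases hlt : PySem.Chars.find (s.drop start) p < e
      · rw [if_pos (by constructor <;> omega)]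
        have : pvG (s.drop start) e p = PySem.Chars.find (s.drop start) p := by
          simp [pvG, hf, hlt]
        rw [this, ← ih (PySem.Chars.find (s.drop start) p)]
      · rw [if_neg (by omega)]
        have : pvG (s.drop start) e p = e := by
          simp only [pvG, ne_eq, hf, not_false_eq_true, true_and, if_neg hlt]
        rw [this]
        exact ih e

-- ===== VERDICT (by name: the statement is the Claim_ definition above) =====
set_option maxHeartbeats 1000000 in
theorem extract_infill_from_output_py_spec : Claim_equal_extract_infill_from_output_py := by
  intro full_output stop_strings _
  unfold Spec_extract_infill_from_output_py
  simp only [extract_infill_from_output_py, extract_infill_from_output_py_alt]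
  set s := full_output.toList with hs
  by_cases hin : PySem.Str.isIn pvFIM full_output = false
  · -- FIM_MIDDLE absent: both return none
    rw [PySem.Str.isIn_eq] at hin
    have hf : PySem.Chars.find s pvFIM.toList = -1 := by
      rw [PySem.Chars.find_eq_neg_one_iff]
      exact (PySem.Chars.isIn_eq_false_iff _ _).mp hin
    simp [hin, hf]
  · -- FIM_MIDDLE present
    have hin' : PySem.Chars.isIn pvFIM.toList s = true := by
      have : PySem.Str.isIn pvFIM full_output = true := by
        cases h : PySem.Str.isIn pvFIM full_output
        · exact absurd h hin
        · rfl
      simpa [PySem.Str.isIn_eq] using this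
    have hf : PySem.Chars.find s pvFIM.toList ≠ -1 := by
      rw [PySem.Chars.find_ne_neg_one_iff, ← PySem.Chars.isIn_iff_infix]; exact hin'
    have hge : 0 ≤ PySem.Chars.find s pvFIM.toList := by
      have := PySem.Chars.neg_one_le_find (s := s) (sub := pvFIM.toList); omega
    obtain ⟨hpref, _⟩ := PySem.Chars.find_spec (s := s) (sub := pvFIM.toList) hge
    set f := PySem.Chars.find s pvFIM.toList with hfdef
    set start : Nat := f.toNat + pvFIM.toList.length with hstartdef
    have hstart_le : start ≤ s.length := by
      have hlenp : pvFIM.toList.length ≤ (s.drop f.toNat).length := hpref.length_le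
      rw [List.length_drop] at hlenp
      have hfle : f ≤ (s.length : Int) := PySem.Chars.find_le_length (s := s) (sub := pvFIM.toList)
      omega
    rw [if_neg (by simpa using hin), if_neg hf]
    set tail := s.drop start with htail
    set stops := (stop_strings ++ [pvEOT, pvFSEP]).map String.toList with hstops
    -- identify A's start_idx with (start : Int)
    have hstart_eq : PySem.Str.find full_output pvFIM + PySem.Str.len pvFIM = (start : Int) := by
      simp only [PySem.Str.find_eq, PySem.Str.len_eq, ← hs, ← hfdef, hstartdef]
      push_cast
      omega
    -- identify A's fold with start + B's scan
    have hfold : (stop_strings ++ [pvEOT, pvFSEP]).foldl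
        (fun e stop =>
          let idx := PySem.Str.findFrom full_output stop
            (PySem.Str.find full_output pvFIM + PySem.Str.len pvFIM) none
          if idx ≠ -1 ∧ idx < e then idx else e)
        (PySem.Str.len full_output) =
        (start : Int) + (((pvFindStop stops tail).getD tail.length : Nat) : Int) := by
      have hlen : (PySem.Str.len full_output) = (start : Int) + ((tail.length : Nat) : Int) := by
        simp only [PySem.Str.len_eq, ← hs, htail, List.length_drop]
        omega
      rw [hlen, ← pv_fold_eq_scan stops tail]
      have hfoldmap : ∀ (init : Int),
          (stop_strings ++ [pvEOT, pvFSEP]).foldl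
            (fun e stop =>
              let idx := PySem.Str.findFrom full_output stop
                (PySem.Str.find full_output pvFIM + PySem.Str.len pvFIM) none
              if idx ≠ -1 ∧ idx < e then idx else e) init =
          stops.foldl
            (fun e p =>
              let idx := PySem.Chars.findFrom s p (start : Int) none
              if idx ≠ -1 ∧ idx < e then idx else e) init := by
        intro init
        rw [hstops, List.foldl_map]
        apply PySem.List.foldl_congr_mem
        intro e stop _
        simp only [PySem.Str.findFrom_eq, hstart_eq, ← hs]
      rw [hfoldmap, htail]
      exact pv_fold_rebase s start hstart_le stops ((tail.length : Nat) : Int)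
    rw [hfold]
    -- identify the slices
    have hslice : (PySem.Str.slice full_output
        (some (PySem.Str.find full_output pvFIM + PySem.Str.len pvFIM))
        (some ((start : Int) + (((pvFindStop stops tail).getD tail.length : Nat) : Int)))).toList =
        tail.take ((pvFindStop stops tail).getD tail.length) := by
      rw [PySem.Str.toList_slice, hstart_eq, ← hs]
      simp only [PySem.Chars.slice_eq_listSlice]
      rw [PySem.List.slice_natCast_add, htail]
    refine congrArg some ?_
    rw [← String.ofList_toList (s := PySem.Str.strip _), PySem.Str.toList_strip, hslice]
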